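-- pv_equiv track=rewrite | github.com/jxm083/advent_of_code_2024 | advent/advent_of_code_2024/day07/main.py | is_valid_equation
-- ===== SOURCE A (Python) =====
-- from typing import TypeAlias, Callable, Iterator
-- from operator import add, mul
-- from itertools import product
--
-- Equation: TypeAlias = tuple[int, tuple[int,...]]
--
-- FunctionList: TypeAlias = tuple[Callable[[int, int], int],...]
--
-- LIST_OF_FUNCTIONS: FunctionList = (add, mul)
--
-- def generate_function_combo(number_of_terms: int, function_list: FunctionList = LIST_OF_FUNCTIONS) -> Iterator[FunctionList]:
--     combinations = product(function_list, repeat=number_of_terms - 1)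
--     for combo in combinations:
--         yield combo
--
-- def evaluate_function_combos(terms: tuple[int,...], function_list: FunctionList = LIST_OF_FUNCTIONS) -> Iterator[int]:
--     function_combos = generate_function_combo(len(terms), function_list=function_list)
--
--     for combo in function_combos:
--         total = terms[0]
--         for ind, function in enumerate(combo):
--             total = function(total, terms[ind + 1])
--
--         yield total
--
-- def is_valid_equation(equation: Equation, function_list: FunctionList = LIST_OF_FUNCTIONS) -> bool:
--     answer = equation[0]
--     terms = equation[1]
--     valid_equation = False
--
--     function_evaluations: Iterator[int] = evaluate_function_combos(terms, function_list=function_list)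
--
--     for eval in function_evaluations:
--         if eval == answer:
--             valid_equation = True
--             break
--
--     return valid_equation
-- ===== SOURCE B (Python) =====
-- from operator import add, mul
--
-- LIST_OF_FUNCTIONS = (add, mul)
--
-- def is_valid_equation(equation, function_list=LIST_OF_FUNCTIONS):
--     answer, terms = equation
--     reachable = {terms[0]}
--     for t in terms[1:]:
--         reachable = {f(v, t) for v in reachable for f in function_list}
--     return answer in reachable
-- ===== Notes on version B (the rewrite author's own statement) =====
-- stated objective: alternative
-- what changed: Replaces exhaustive enumeration of all 2^(n-1) operator combinations (itertools.product + re-evaluation of each full expression) with a left-to-right reachable-value-set DP that deduplicates partial results at every step.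
import Mathlib
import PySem

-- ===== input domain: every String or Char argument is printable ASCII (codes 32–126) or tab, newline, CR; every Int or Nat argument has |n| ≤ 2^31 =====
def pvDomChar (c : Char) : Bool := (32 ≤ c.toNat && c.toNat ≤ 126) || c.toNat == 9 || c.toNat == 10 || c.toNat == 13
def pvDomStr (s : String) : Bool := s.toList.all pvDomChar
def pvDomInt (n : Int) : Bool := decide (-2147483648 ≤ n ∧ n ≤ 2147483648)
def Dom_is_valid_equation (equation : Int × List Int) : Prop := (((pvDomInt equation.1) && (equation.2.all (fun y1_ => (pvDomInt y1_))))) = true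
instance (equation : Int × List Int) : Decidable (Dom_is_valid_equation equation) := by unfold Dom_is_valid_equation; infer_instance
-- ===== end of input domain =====

-- B: a left-to-right reachable-value-set DP (deduplicated partial results) instead of
-- enumerating all operator combinations; a genuinely different algorithm, equal return value.

-- ===== PORT A =====
-- LIST_OF_FUNCTIONS = (add, mul)
def pvFuncs : List (Int → Int → Int) := [fun a b => a + b, fun a b => a * b]

-- generate_function_combo: itertools.product(function_list, repeat = k), in product order
def pvCombos : Nat → List (List (Int → Int → Int))
  | 0 => [[]]
  | k + 1 => pvFuncs.flatMap (fun f => (pvCombos k).map (fun c => f :: c))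

-- evaluate one combo: total = terms[0]; for ind, f in enumerate(combo): total = f(total, terms[ind+1])
-- (|combo| = |terms| - 1, so zip with the tail visits exactly terms[ind+1]; indices always in range)
def pvEvalCombo (terms : List Int) (combo : List (Int → Int → Int)) : Int :=
  (combo.zip terms.tail).foldl (fun total p => p.1 total p.2) (terms.headD 0)

def is_valid_equation (equation : Int × List Int) : Bool :=
  let answer := equation.1
  let terms := equation.2
  let evals := (pvCombos (terms.length - 1)).map (pvEvalCombo terms)
  evals.any (fun e => e == answer)

-- ===== PORT B =====
-- reachable = {f(v, t) for v in reachable for f in function_list}, one step of the DP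
def pvStep (vals : PySem.Set Int) (t : Int) : PySem.Set Int :=
  PySem.Set.ofList (vals.flatMap (fun v => pvFuncs.map (fun f => f v t)))

def is_valid_equation_alt (equation : Int × List Int) : Bool :=
  match equation.2 with
  | [] => false
  | t :: rest =>
    let reachable := rest.foldl pvStep (PySem.Set.ofList [t])
    reachable.contains equation.1

-- ===== PRECONDITION & SPEC =====
-- Pre_ excludes only the empty term list, on which A raises ValueError (product(..., repeat=-1)).
def Pre_is_valid_equation (equation : Int × List Int) : Prop := equation.2 ≠ []
instance (equation : Int × List Int) : Decidable (Pre_is_valid_equation equation) := by unfold Pre_is_valid_equation; infer_instance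
def pvWitness_is_valid_equation : (Int × List Int) := (3, [1, 2])

def Spec_is_valid_equation (equation : Int × List Int) (out : Bool) : Prop := out = is_valid_equation_alt equation
instance (equation : Int × List Int) (out : Bool) : Decidable (Spec_is_valid_equation equation out) := by unfold Spec_is_valid_equation; infer_instance

-- ===== CLAIM (what is proved, stated in full; the proofs are below) =====
def Claim_equal_is_valid_equation : Prop := ∀ (equation : Int × List Int), Dom_is_valid_equation equation → Pre_is_valid_equation equation → Spec_is_valid_equation equation (is_valid_equation equation)

-- ===== LEMMAS AND PROOFS =====

-- membership in a (k+1)-combo decomposes into a head function and a k-combo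
theorem mem_pvCombos_succ {k : Nat} {c : List (Int → Int → Int)} :
    c ∈ pvCombos (k + 1) ↔ ∃ f ∈ pvFuncs, ∃ c' ∈ pvCombos k, c = f :: c' := by
  simp [pvCombos, List.mem_flatMap, eq_comm]

-- membership in one DP step
theorem mem_pvStep {vals : PySem.Set Int} {t x : Int} :
    x ∈ pvStep vals t ↔ ∃ v ∈ vals, ∃ f ∈ pvFuncs, x = f v t := by
  simp [pvStep, PySem.Set.mem_ofList, List.mem_flatMap, eq_comm]

-- evaluation of a combo from a start value along a list of terms
def pvEvalFrom (v : Int) (combo : List (Int → Int → Int)) (rest : List Int) : Int :=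
  (combo.zip rest).foldl (fun total p => p.1 total p.2) v

-- core invariant: the folded reachable set contains x iff some start value in S
-- extends via some combo over rest to x
theorem foldl_pvStep_mem (rest : List Int) (S : PySem.Set Int) (x : Int) :
    x ∈ rest.foldl pvStep S ↔ ∃ v ∈ S, ∃ c ∈ pvCombos rest.length, pvEvalFrom v c rest = x := by
  induction rest generalizing S with
  | nil => simp [pvCombos, pvEvalFrom, eq_comm]
  | cons t rest ih =>
    simp only [List.foldl_cons, ih, List.length_cons]
    constructor
    · rintro ⟨w, hw, c, hc, he⟩
      rcases mem_pvStep.mp hw with ⟨v, hv, f, hf, rfl⟩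
      exact ⟨v, hv, f :: c, mem_pvCombos_succ.mpr ⟨f, hf, c, hc, rfl⟩, he⟩
    · rintro ⟨v, hv, c, hc, he⟩
      rcases mem_pvCombos_succ.mp hc with ⟨f, hf, c', hc', rfl⟩
      exact ⟨f v t, mem_pvStep.mpr ⟨v, hv, f, hf, rfl⟩, c', hc', he⟩

-- ===== VERDICT (by name: the statement is the Claim_ definition above) =====
theorem is_valid_equation_spec : Claim_equal_is_valid_equation := by
  intro ⟨answer, terms⟩ _ hpre
  unfold Spec_is_valid_equation is_valid_equation is_valid_equation_alt
  match terms, hpre with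
  | t :: rest, _ =>
    simp only
    rw [Bool.eq_iff_iff, PySem.Set.contains_iff]
    rw [foldl_pvStep_mem]
    simp only [List.any_map, List.any_eq_true, Function.comp, beq_iff_eq]
    constructor
    · rintro ⟨c, hc, he⟩
      refine ⟨t, by simp [PySem.Set.mem_ofList], c, by simpa using hc, ?_⟩
      simpa [pvEvalFrom, pvEvalCombo] using he
    · rintro ⟨v, hv, c, hc, he⟩
      have : v = t := by simpa [PySem.Set.mem_ofList] using hv
      subst this
      exact ⟨c, by simpa using hc, by simpa [pvEvalFrom, pvEvalCombo] using he⟩
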